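-- pv_equiv track=rewrite | github.com/konrph/chickenctrl | modules/sensors/sensors.py | remove_high_low
-- ===== SOURCE A (Python) =====
-- def remove_high_low(values):
--     if values:
--         if len(values)==10:
--             for i in range(0,4,1):
--                 values.remove(max(values))
--
--             for i in range(0,5,1):
--                 values.remove(min(values))
--             return values
-- ===== SOURCE B (Python) =====
-- def remove_high_low(values):
--     if values:
--         if len(values) == 10:
--             values[:] = [sorted(values)[5]]
--             return values
-- ===== Notes on version B (the rewrite author's own statement) =====
-- stated objective: simpler
-- what changed: Replaces the nine repeated max/min scans with removals by one sort plus a single index: the survivor of removing the 4 largest and 5 smallest of 10 elements is the 6th-smallest, sorted(values)[5]; the list is mutated in place via slice assignment as in A.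
import Mathlib
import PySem

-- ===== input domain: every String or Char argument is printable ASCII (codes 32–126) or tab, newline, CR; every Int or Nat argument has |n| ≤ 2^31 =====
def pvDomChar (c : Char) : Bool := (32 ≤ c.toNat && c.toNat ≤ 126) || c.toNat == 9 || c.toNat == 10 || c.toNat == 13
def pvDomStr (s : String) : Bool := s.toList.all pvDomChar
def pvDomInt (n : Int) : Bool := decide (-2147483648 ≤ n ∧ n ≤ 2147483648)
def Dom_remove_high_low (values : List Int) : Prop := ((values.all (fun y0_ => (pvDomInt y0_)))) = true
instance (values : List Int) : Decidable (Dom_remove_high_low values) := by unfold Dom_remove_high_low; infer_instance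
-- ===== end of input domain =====

-- B replaces the nine repeated max/min scan-and-remove loops by one sort and a single index
-- (the survivor is the 6th-smallest element); like A, B mutates the list in place (values[:] = ...),
-- and the equivalence proved here is about the RETURN value.


-- ===== PORT A =====
-- values.remove(max(values)) / values.remove(min(values)): max()/min() of an empty list would
-- raise, but A's loops only run on a 10-element list, so the none branches below are unreachable.
def pyRemoveMax (vs : List Int) : List Int :=
  match PySem.List.max? vs (fun x => x) with
  | some m => (PySem.List.remove? vs m).getD vs
  | none => vs

def pyRemoveMin (vs : List Int) : List Int :=
  match PySem.List.min? vs (fun x => x) with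
  | some m => (PySem.List.remove? vs m).getD vs
  | none => vs

def remove_high_low (values : List Int) : Option (List Int) :=
  if values.isEmpty then none
  else if values.length = 10 then
    let v1 := (PySem.List.pyRange 0 4 1).foldl (fun vs _ => pyRemoveMax vs) values
    let v2 := (PySem.List.pyRange 0 5 1).foldl (fun vs _ => pyRemoveMin vs) v1
    some v2
  else none

-- ===== PORT B =====
-- sorted(values)[5]: the index 5 is in range under the length-10 guard, so the none branch is unreachable.
def remove_high_low_alt (values : List Int) : Option (List Int) :=
  if values.isEmpty then none
  else if values.length = 10 then
    match PySem.List.pyGet? (PySem.List.sorted values (fun x => x) false) 5 with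
    | some x => some [x]
    | none => none
  else none

-- ===== PRECONDITION & SPEC =====
def Spec_remove_high_low (values : List Int) (out : Option (List Int)) : Prop := out = remove_high_low_alt values
instance (values : List Int) (out : Option (List Int)) : Decidable (Spec_remove_high_low values out) := by unfold Spec_remove_high_low; infer_instance

-- ===== CLAIM (what is proved, stated in full; the proofs are below) =====
def Claim_equal_remove_high_low : Prop := ∀ (values : List Int), Dom_remove_high_low values → Spec_remove_high_low values (remove_high_low values)

-- ===== LEMMAS AND PROOFS =====

theorem sorted_pyRemoveMax (vs : List Int) (h : vs ≠ []) :
    PySem.List.sorted (pyRemoveMax vs) (fun x => x) false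
      = (PySem.List.sorted vs (fun x => x) false).dropLast := by
  rcases hmax : PySem.List.max? vs (fun x => x) with _ | m
  · exact absurd ((PySem.List.max?_eq_none_iff vs _).mp hmax) h
  have hmem : m ∈ vs := PySem.List.max?_mem hmax
  have hle : ∀ y ∈ vs, y ≤ m := PySem.List.max?_isMax hmax
  have hrw : pyRemoveMax vs = vs.erase m := by
    simp [pyRemoveMax, hmax, PySem.List.remove?_eq_some_erase vs m hmem]
  rw [hrw]
  have hperm_s : (PySem.List.sorted vs (fun x => x) false).Perm vs :=
    PySem.List.sorted_perm vs (fun x => x) false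
  have hsne : PySem.List.sorted vs (fun x => x) false ≠ [] := by
    intro hc; exact h ((PySem.List.sorted_eq_nil_iff vs _ false).mp hc)
  have hslen : 0 < (PySem.List.sorted vs (fun x => x) false).length :=
    List.length_pos_of_ne_nil hsne
  have hlast : (PySem.List.sorted vs (fun x => x) false).getLast hsne = m := by
    have h1 : (PySem.List.sorted vs (fun x => x) false).getLast hsne ≤ m :=
      hle _ (hperm_s.mem_iff.mp (List.getLast_mem hsne))
    have h2 : m ≤ (PySem.List.sorted vs (fun x => x) false).getLast hsne := by
      obtain ⟨p, hp, hpe⟩ := List.mem_iff_getElem.mp (hperm_s.mem_iff.mpr hmem)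
      rw [List.getLast_eq_getElem, ← hpe]
      exact PySem.List.sorted_id_getElem_mono vs (by omega) (by omega)
    omega
  apply PySem.List.sorted_id_eq_of_perm_of_pairwise
  · have hp1 : ((PySem.List.sorted vs (fun x => x) false).dropLast ++ [m]).Perm (m :: vs.erase m) := by
      have hsplit : (PySem.List.sorted vs (fun x => x) false).dropLast ++ [m]
          = PySem.List.sorted vs (fun x => x) false := by
        conv_lhs => rw [← hlast]
        exact List.dropLast_append_getLast hsne
      rw [hsplit]
      exact hperm_s.trans (List.perm_cons_erase hmem)
    exact ((List.perm_append_singleton m _).symm.trans hp1).cons_inv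
  · exact (PySem.List.sorted_pairwise vs (fun x => x)).sublist (List.dropLast_sublist _)

theorem sorted_pyRemoveMin (vs : List Int) (h : vs ≠ []) :
    PySem.List.sorted (pyRemoveMin vs) (fun x => x) false
      = (PySem.List.sorted vs (fun x => x) false).tail := by
  rcases hmin : PySem.List.min? vs (fun x => x) with _ | m
  · exact absurd ((PySem.List.min?_eq_none_iff vs _).mp hmin) h
  have hmem : m ∈ vs := PySem.List.min?_mem hmin
  have hge : ∀ y ∈ vs, m ≤ y := PySem.List.min?_isMin hmin
  have hrw : pyRemoveMin vs = vs.erase m := by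
    simp [pyRemoveMin, hmin, PySem.List.remove?_eq_some_erase vs m hmem]
  rw [hrw]
  rcases hcons : PySem.List.sorted vs (fun x => x) false with _ | ⟨a, t⟩
  · exact absurd ((PySem.List.sorted_eq_nil_iff vs _ false).mp hcons) h
  have hperm_s : (PySem.List.sorted vs (fun x => x) false).Perm vs :=
    PySem.List.sorted_perm vs (fun x => x) false
  rw [hcons] at hperm_s
  have hhead : a = m := by
    have h1 : a ≤ m := PySem.List.key_head_sorted_le vs (fun x => x) hcons m hmem
    have h2 : m ≤ a := hge a (hperm_s.mem_iff.mp List.mem_cons_self)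
    omega
  apply PySem.List.sorted_id_eq_of_perm_of_pairwise
  · have hp1 : (a :: t).Perm (m :: vs.erase m) :=
      hperm_s.trans (List.perm_cons_erase hmem)
    rw [hhead] at hp1
    exact hp1.cons_inv
  · have hpw := PySem.List.sorted_pairwise vs (fun x => x)
    rw [hcons] at hpw
    exact hpw.tail

theorem length_pyRemoveMax (vs : List Int) (h : vs ≠ []) :
    (pyRemoveMax vs).length = vs.length - 1 := by
  have h1 := congrArg List.length (sorted_pyRemoveMax vs h)
  simpa [PySem.List.length_sorted, List.length_dropLast] using h1

theorem length_pyRemoveMin (vs : List Int) (h : vs ≠ []) :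
    (pyRemoveMin vs).length = vs.length - 1 := by
  have h1 := congrArg List.length (sorted_pyRemoveMin vs h)
  simpa [PySem.List.length_sorted, List.length_tail] using h1

theorem chop10 (s : List Int) (hs : s.length = 10) :
    s.dropLast.dropLast.dropLast.dropLast.tail.tail.tail.tail.tail = [s[5]'(by omega)] := by
  rcases s with _ | ⟨a, _ | ⟨b, _ | ⟨c, _ | ⟨d, _ | ⟨e, _ | ⟨f, _ | ⟨g, _ | ⟨h1, _ | ⟨i, _ | ⟨j, _ | ⟨k, s⟩⟩⟩⟩⟩⟩⟩⟩⟩⟩⟩ <;>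
    first
      | rfl
      | (exfalso; simp at hs)


-- The heart of the equivalence: on a 10-element list, four max-removals followed by five
-- min-removals leave exactly the 6th-smallest element.
theorem core_remove_high_low (values : List Int) (hl : values.length = 10) (hne : values ≠ []) :
    (some (pyRemoveMin (pyRemoveMin (pyRemoveMin (pyRemoveMin (pyRemoveMin
      (pyRemoveMax (pyRemoveMax (pyRemoveMax (pyRemoveMax values))))))))) : Option (List Int))
    = match PySem.List.pyGet? (PySem.List.sorted values (fun x => x) false) 5 with
      | some x => some [x]
      | none => none := by
  have l0 : values.length = 10 := hl
  have ne0 : values ≠ [] := hne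
  have l1 : (pyRemoveMax values).length = 9 := by rw [length_pyRemoveMax values ne0, l0]
  have ne1 : pyRemoveMax values ≠ [] := by intro hc; rw [hc] at l1; simp at l1
  have l2 : (pyRemoveMax (pyRemoveMax values)).length = 8 := by rw [length_pyRemoveMax _ ne1, l1]
  have ne2 : pyRemoveMax (pyRemoveMax values) ≠ [] := by intro hc; rw [hc] at l2; simp at l2
  have l3 : (pyRemoveMax (pyRemoveMax (pyRemoveMax values))).length = 7 := by rw [length_pyRemoveMax _ ne2, l2]
  have ne3 : pyRemoveMax (pyRemoveMax (pyRemoveMax values)) ≠ [] := by intro hc; rw [hc] at l3; simp at l3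
  have l4 : (pyRemoveMax (pyRemoveMax (pyRemoveMax (pyRemoveMax values)))).length = 6 := by rw [length_pyRemoveMax _ ne3, l3]
  have ne4 : pyRemoveMax (pyRemoveMax (pyRemoveMax (pyRemoveMax values))) ≠ [] := by intro hc; rw [hc] at l4; simp at l4
  set a4 := pyRemoveMax (pyRemoveMax (pyRemoveMax (pyRemoveMax values))) with ha4
  have l5 : (pyRemoveMin a4).length = 5 := by rw [length_pyRemoveMin _ ne4, l4]
  have ne5 : pyRemoveMin a4 ≠ [] := by intro hc; rw [hc] at l5; simp at l5
  have l6 : (pyRemoveMin (pyRemoveMin a4)).length = 4 := by rw [length_pyRemoveMin _ ne5, l5]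
  have ne6 : pyRemoveMin (pyRemoveMin a4) ≠ [] := by intro hc; rw [hc] at l6; simp at l6
  have l7 : (pyRemoveMin (pyRemoveMin (pyRemoveMin a4))).length = 3 := by rw [length_pyRemoveMin _ ne6, l6]
  have ne7 : pyRemoveMin (pyRemoveMin (pyRemoveMin a4)) ≠ [] := by intro hc; rw [hc] at l7; simp at l7
  have l8 : (pyRemoveMin (pyRemoveMin (pyRemoveMin (pyRemoveMin a4)))).length = 2 := by rw [length_pyRemoveMin _ ne7, l7]
  have ne8 : pyRemoveMin (pyRemoveMin (pyRemoveMin (pyRemoveMin a4))) ≠ [] := by intro hc; rw [hc] at l8; simp at l8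
  set b5 := pyRemoveMin (pyRemoveMin (pyRemoveMin (pyRemoveMin (pyRemoveMin a4)))) with hb5
  have l9 : b5.length = 1 := by rw [hb5, length_pyRemoveMin _ ne8, l8]
  -- sorted chain
  have hsort : PySem.List.sorted b5 (fun x => x) false
      = (PySem.List.sorted values (fun x => x) false).dropLast.dropLast.dropLast.dropLast.tail.tail.tail.tail.tail := by
    rw [hb5, sorted_pyRemoveMin _ ne8, sorted_pyRemoveMin _ ne7, sorted_pyRemoveMin _ ne6,
        sorted_pyRemoveMin _ ne5, sorted_pyRemoveMin _ ne4, ha4,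
        sorted_pyRemoveMax _ ne3, sorted_pyRemoveMax _ ne2, sorted_pyRemoveMax _ ne1,
        sorted_pyRemoveMax _ ne0]
  have hslen : (PySem.List.sorted values (fun x => x) false).length = 10 := by
    rw [PySem.List.length_sorted, l0]
  rw [chop10 _ hslen] at hsort
  obtain ⟨x, hx⟩ := List.length_eq_one_iff.mp l9
  have hb5sort : PySem.List.sorted b5 (fun x => x) false = b5 := by rw [hx]; rfl
  rw [hb5sort, hx] at hsort
  rw [hx]
  have h5 : 5 < (PySem.List.sorted values (fun x => x) false).length := by
    rw [hslen]; norm_num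
  have hget : PySem.List.pyGet? (PySem.List.sorted values (fun x => x) false) 5
      = some ((PySem.List.sorted values (fun x => x) false)[5]'h5) := by
    rw [PySem.List.pyGet?_ofNat']
    exact List.getElem?_eq_getElem h5
  rw [hget]
  rw [hsort]

-- ===== VERDICT (by name: the statement is the Claim_ definition above) =====
theorem remove_high_low_spec : Claim_equal_remove_high_low := by
  intro values _
  unfold Spec_remove_high_low remove_high_low remove_high_low_alt
  by_cases he : values.isEmpty
  · simp [he]
  · have hne : values ≠ [] := by simpa [List.isEmpty_iff] using he
    by_cases hl : values.length = 10
    · have hr4 : PySem.List.pyRange 0 4 1 = ([0, 1, 2, 3] : List Int) := by decide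
      have hr5 : PySem.List.pyRange 0 5 1 = ([0, 1, 2, 3, 4] : List Int) := by decide
      simp only [he, hl, if_true, if_false, Bool.false_eq_true, hr4, hr5, List.foldl]
      exact core_remove_high_low values hl hne
    · simp [he, hl]
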